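-- pv_equiv track=rewrite | github.com/CoolPlayLin/AutoPublish | src/main.py | matchWithKeyWords
-- ===== SOURCE A (Python) =====
-- def matchWithKeyWords(
--     value: list[str],
--     requiredKeywords: list[str] = [],
--     necessaryKeywords: list[str] = [],
--     excludedKeywords: list[str] = [],
--     prefix: str | None = None,
-- ) -> list[str]:
--     result = value
--     if excludedKeywords:
--         for keyword in excludedKeywords:
--             result = [v for v in result if not keyword in v]
--     if requiredKeywords:
--         for keyword in requiredKeywords:
--             result = [v for v in result if keyword in v]
--     if necessaryKeywords:
--         includingResult = {
--             k: v
--             for k, v in [(v, any([k in v for k in necessaryKeywords])) for v in result]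
--         }
--         result = [v for v in result if includingResult[v]]
--     if prefix:
--         result = [prefix + r for r in result]
--     return result
-- ===== SOURCE B (Python) =====
-- def matchWithKeyWords(
--     value: list[str],
--     requiredKeywords: list[str] = [],
--     necessaryKeywords: list[str] = [],
--     excludedKeywords: list[str] = [],
--     prefix: str | None = None,
-- ) -> list[str]:
--     kept = [
--         v
--         for v in value
--         if not any(k in v for k in excludedKeywords)
--         and all(k in v for k in requiredKeywords)
--         and (not necessaryKeywords or any(k in v for k in necessaryKeywords))
--     ]
--     return [prefix + v for v in kept] if prefix else kept
-- ===== Notes on version B (the rewrite author's own statement) =====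
-- stated objective: simpler
-- what changed: One single-pass list comprehension testing all three keyword conditions per string replaces the sequential per-keyword filter passes and the intermediate dict; prefix is applied in one final step.
import Mathlib
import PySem

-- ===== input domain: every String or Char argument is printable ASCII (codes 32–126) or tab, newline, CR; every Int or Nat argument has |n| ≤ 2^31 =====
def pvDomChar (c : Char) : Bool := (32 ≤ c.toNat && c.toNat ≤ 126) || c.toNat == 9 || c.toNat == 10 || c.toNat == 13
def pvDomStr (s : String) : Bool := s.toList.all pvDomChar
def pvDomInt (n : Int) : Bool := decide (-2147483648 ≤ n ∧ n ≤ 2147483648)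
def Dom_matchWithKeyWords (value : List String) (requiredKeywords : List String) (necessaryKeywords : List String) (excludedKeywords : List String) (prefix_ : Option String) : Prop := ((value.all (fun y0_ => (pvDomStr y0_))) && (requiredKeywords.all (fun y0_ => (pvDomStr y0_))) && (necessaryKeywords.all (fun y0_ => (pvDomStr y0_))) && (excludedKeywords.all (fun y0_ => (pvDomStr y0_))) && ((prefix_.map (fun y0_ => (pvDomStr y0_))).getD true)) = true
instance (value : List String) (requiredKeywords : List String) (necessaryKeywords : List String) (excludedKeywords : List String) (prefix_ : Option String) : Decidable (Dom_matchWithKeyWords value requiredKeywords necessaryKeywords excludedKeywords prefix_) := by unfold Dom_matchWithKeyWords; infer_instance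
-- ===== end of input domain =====

-- B replaces A's sequential per-keyword filter passes and intermediate dict with one
-- single-pass comprehension testing all keyword conditions per string (objective: simpler).


-- shared exact port of Python string concatenation 'p + r' (kernel-transparent, unlike String.append)
def pvCat (p r : String) : String := String.ofList (p.toList ++ r.toList)

-- ===== PORT A =====
def matchWithKeyWords (value : List String) (requiredKeywords : List String) (necessaryKeywords : List String) (excludedKeywords : List String) (prefix_ : Option String) : List String :=
  let result := value
  -- if excludedKeywords: for keyword in excludedKeywords: result = [v for v in result if not keyword in v]
  let result := if excludedKeywords.isEmpty then result else
    excludedKeywords.foldl (fun r keyword => r.filter (fun v => !(PySem.Str.isIn keyword v))) result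
  -- if requiredKeywords: for keyword in requiredKeywords: result = [v for v in result if keyword in v]
  let result := if requiredKeywords.isEmpty then result else
    requiredKeywords.foldl (fun r keyword => r.filter (fun v => PySem.Str.isIn keyword v)) result
  -- if necessaryKeywords: build includingResult dict, then filter by lookup (key always present)
  let result := if necessaryKeywords.isEmpty then result else
    let includingResult : PySem.Dict String Bool :=
      PySem.Dict.ofList (result.map (fun v => (v, necessaryKeywords.any (fun k => PySem.Str.isIn k v))))
    result.filter (fun v => (includingResult.get? v).getD false)
  -- if prefix: result = [prefix + r for r in result]   ('if prefix:' = some non-empty string)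
  match prefix_ with
  | some p => if p = "" then result else result.map (fun r => pvCat p r)
  | none => result

-- ===== PORT B =====
def matchWithKeyWords_alt (value : List String) (requiredKeywords : List String) (necessaryKeywords : List String) (excludedKeywords : List String) (prefix_ : Option String) : List String :=
  let kept := value.filter (fun v =>
    !(excludedKeywords.any (fun k => PySem.Str.isIn k v)) &&
    requiredKeywords.all (fun k => PySem.Str.isIn k v) &&
    (necessaryKeywords.isEmpty || necessaryKeywords.any (fun k => PySem.Str.isIn k v)))
  match prefix_ with
  | some p => if p = "" then kept else kept.map (fun v => pvCat p v)
  | none => kept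

-- ===== PRECONDITION & SPEC =====
def Spec_matchWithKeyWords (value : List String) (requiredKeywords : List String) (necessaryKeywords : List String) (excludedKeywords : List String) (prefix_ : Option String) (out : List String) : Prop := out = matchWithKeyWords_alt value requiredKeywords necessaryKeywords excludedKeywords prefix_
instance (value : List String) (requiredKeywords : List String) (necessaryKeywords : List String) (excludedKeywords : List String) (prefix_ : Option String) (out : List String) : Decidable (Spec_matchWithKeyWords value requiredKeywords necessaryKeywords excludedKeywords prefix_ out) := by unfold Spec_matchWithKeyWords; infer_instance

-- ===== CLAIM (what is proved, stated in full; the proofs are below) =====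
def Claim_equal_matchWithKeyWords : Prop := ∀ (value : List String) (requiredKeywords : List String) (necessaryKeywords : List String) (excludedKeywords : List String) (prefix_ : Option String), Dom_matchWithKeyWords value requiredKeywords necessaryKeywords excludedKeywords prefix_ → Spec_matchWithKeyWords value requiredKeywords necessaryKeywords excludedKeywords prefix_ (matchWithKeyWords value requiredKeywords necessaryKeywords excludedKeywords prefix_)

-- ===== LEMMAS AND PROOFS =====

-- a chain of per-keyword filter passes equals one filter by the conjunction of all tests
theorem foldl_filter_eq_filter_all {α β : Type} (p : β → α → Bool) :
    ∀ (ks : List β) (l : List α),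
      ks.foldl (fun r k => r.filter (p k)) l = l.filter (fun v => ks.all (fun k => p k v)) := by
  intro ks
  induction ks with
  | nil => intro l; simp
  | cons k ks ih =>
    intro l
    simp only [List.foldl_cons, ih, List.filter_filter, List.all_cons]
    exact List.filter_congr (fun v _ => by rw [Bool.and_comm])

-- looking up a key in a dict built as {v : f v for v in l} returns f v for v ∈ l
theorem get?_update_map (f : String → Bool) :
    ∀ (l : List String) (d : PySem.Dict String Bool) (v : String),
      (v ∈ l ∨ d.get? v = some (f v)) →
      (d.update (l.map (fun x => (x, f x)))).get? v = some (f v) := by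
  intro l
  induction l with
  | nil => intro d v hv; simpa using hv
  | cons x xs ih =>
    intro d v hv
    show ((d.insert x (f x)).update (xs.map (fun x => (x, f x)))).get? v = some (f v)
    apply ih
    rcases hv with hv | hv
    · rcases List.mem_cons.mp hv with rfl | hm
      · by_cases hmem : v ∈ xs
        · exact Or.inl hmem
        · exact Or.inr (by rw [PySem.Dict.get?_insert_self])
      · exact Or.inl hm
    · by_cases hx : v = x
      · subst hx; exact Or.inr (by rw [PySem.Dict.get?_insert_self])
      · exact Or.inr (by rw [PySem.Dict.get?_insert_of_ne d (f x) hx]; exact hv)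

-- the dict-based necessary-keywords pass is a plain filter
theorem dict_pass_eq_filter (nk : List String) (l : List String) :
    l.filter (fun v => ((PySem.Dict.ofList (l.map (fun v => (v, nk.any (fun k => PySem.Str.isIn k v))))).get? v).getD false)
      = l.filter (fun v => nk.any (fun k => PySem.Str.isIn k v)) := by
  apply List.filter_congr
  intro v hv
  rw [PySem.Dict.ofList, get?_update_map _ l _ v (Or.inl hv)]
  rfl

-- the unprefixed part of A equals the unprefixed part of B
theorem kept_eq (value requiredKeywords necessaryKeywords excludedKeywords : List String) :
    (let r1 := if excludedKeywords.isEmpty then value else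
        excludedKeywords.foldl (fun r keyword => r.filter (fun v => !(PySem.Str.isIn keyword v))) value
     let r2 := if requiredKeywords.isEmpty then r1 else
        requiredKeywords.foldl (fun r keyword => r.filter (fun v => PySem.Str.isIn keyword v)) r1
     if necessaryKeywords.isEmpty then r2 else
        r2.filter (fun v => ((PySem.Dict.ofList (r2.map (fun v => (v, necessaryKeywords.any (fun k => PySem.Str.isIn k v))))).get? v).getD false))
    = value.filter (fun v =>
        !(excludedKeywords.any (fun k => PySem.Str.isIn k v)) &&
        requiredKeywords.all (fun k => PySem.Str.isIn k v) &&
        (necessaryKeywords.isEmpty || necessaryKeywords.any (fun k => PySem.Str.isIn k v))) := by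
  simp only [foldl_filter_eq_filter_all, dict_pass_eq_filter]
  by_cases he : excludedKeywords = [] <;>
    by_cases hr : requiredKeywords = [] <;>
      by_cases hn : necessaryKeywords = [] <;>
        simp [he, hr, hn, List.isEmpty_iff, List.filter_filter, List.all_eq_not_any_not] <;>
        (apply List.filter_congr; intro v _;
         first
         | (rw [List.isEmpty_eq_false_iff.mpr hn]; simp only [Bool.false_or]; try ac_rfl)
         | ac_rfl)

-- ===== VERDICT (by name: the statement is the Claim_ definition above) =====
theorem matchWithKeyWords_spec : Claim_equal_matchWithKeyWords := by
  intro value requiredKeywords necessaryKeywords excludedKeywords prefix_ _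
  show matchWithKeyWords _ _ _ _ _ = matchWithKeyWords_alt _ _ _ _ _
  unfold matchWithKeyWords matchWithKeyWords_alt
  simp only []
  rw [kept_eq]
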